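-- pv_equiv track=rewrite | github.com/mirasurf/cogents | cogents/goalith/decomposer/llm_decomposer.py | _find_dependency_by_description
-- ===== SOURCE A (Python) =====
-- from typing import Any, Dict, List, Optional
--
-- def _find_dependency_by_description(dep_desc: str, desc_to_id: Dict[str, str]) -> Optional[str]:
--     """Find a dependency node by description with fuzzy matching."""
--
--     dep_desc_lower = dep_desc.lower().strip()
--
--     # Exact match first
--     for desc, node_id in desc_to_id.items():
--         if desc.lower().strip() == dep_desc_lower:
--             return node_id
--
--     # Partial match (dependency description is contained in node description)
--     for desc, node_id in desc_to_id.items():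
--         if dep_desc_lower in desc.lower() or desc.lower() in dep_desc_lower:
--             return node_id
--
--     # Word overlap matching
--     dep_words = set(dep_desc_lower.split())
--     best_match = None
--     best_overlap = 0
--
--     for desc, node_id in desc_to_id.items():
--         desc_words = set(desc.lower().split())
--         overlap = len(dep_words & desc_words)
--
--         if overlap > best_overlap and overlap >= 2:  # At least 2 words overlap
--             best_match = node_id
--             best_overlap = overlap
--
--     return best_match
-- ===== SOURCE B (Python) =====
-- def _find_dependency_by_description(dep_desc, desc_to_id):
--     """Single pass: track first exact match, first partial match, and best word overlap."""
--     dql = dep_desc.lower().strip()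
--     dep_words = set(dql.split())
--     exact = None
--     partial = None
--     best = None
--     best_overlap = 0
--     for desc, node_id in desc_to_id.items():
--         dl = desc.lower()
--         if exact is None and dl.strip() == dql:
--             exact = node_id
--         if partial is None and (dql in dl or dl in dql):
--             partial = node_id
--         overlap = len(dep_words & set(dl.split()))
--         if overlap > best_overlap and overlap >= 2:
--             best = node_id
--             best_overlap = overlap
--     if exact is not None:
--         return exact
--     if partial is not None:
--         return partial
--     return best
-- ===== Notes on version B (the rewrite author's own statement) =====
-- stated objective: alternative
-- what changed: Replaced A's three separate passes over the dict (exact, then partial, then word-overlap) with one single pass that simultaneously tracks the first exact match, first partial match and best word overlap, selecting by priority after the loop.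
import Mathlib
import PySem

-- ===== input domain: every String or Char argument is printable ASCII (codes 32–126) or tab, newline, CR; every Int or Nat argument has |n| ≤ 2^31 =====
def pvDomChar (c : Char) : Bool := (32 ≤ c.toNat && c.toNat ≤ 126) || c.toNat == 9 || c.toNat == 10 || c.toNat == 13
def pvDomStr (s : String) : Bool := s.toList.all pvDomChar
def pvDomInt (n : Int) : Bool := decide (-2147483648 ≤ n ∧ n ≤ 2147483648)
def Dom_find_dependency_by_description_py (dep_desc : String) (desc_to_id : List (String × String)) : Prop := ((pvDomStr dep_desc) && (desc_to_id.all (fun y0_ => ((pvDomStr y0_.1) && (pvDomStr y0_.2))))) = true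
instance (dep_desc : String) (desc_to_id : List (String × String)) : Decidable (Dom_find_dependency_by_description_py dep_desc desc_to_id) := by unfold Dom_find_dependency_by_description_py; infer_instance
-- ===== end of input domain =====

-- B makes ONE pass over the dict tracking all three match tiers together, instead of A's
-- three separate passes with early returns; same results, selected by priority after the loop.

-- ===== PORT A =====
-- first loop of A: exact match, early return
def pvFindExact (dql : String) : List (String × String) → Option String
  | [] => none
  | (desc, node_id) :: rest =>
      if PySem.Str.strip (PySem.Str.lower desc) = dql then some node_id
      else pvFindExact dql rest

-- second loop of A: partial (containment) match, early return
def pvFindPartial (dql : String) : List (String × String) → Option String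
  | [] => none
  | (desc, node_id) :: rest =>
      if PySem.Str.isIn dql (PySem.Str.lower desc) || PySem.Str.isIn (PySem.Str.lower desc) dql then some node_id
      else pvFindPartial dql rest

-- third loop of A: best word overlap (state = (best_match, best_overlap))
def pvOvStep (dw : PySem.Set String) (acc : Option String × Int) (p : String × String) : Option String × Int :=
  let overlap := PySem.Set.len (PySem.Set.inter dw (PySem.Set.ofList (PySem.Str.split₀ (PySem.Str.lower p.1))))
  if acc.2 < overlap ∧ 2 ≤ overlap then (some p.2, overlap) else acc

def find_dependency_by_description_py (dep_desc : String) (desc_to_id : List (String × String)) : Option String :=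
  match pvFindExact (PySem.Str.strip (PySem.Str.lower dep_desc)) desc_to_id with
  | some id => some id
  | none =>
    match pvFindPartial (PySem.Str.strip (PySem.Str.lower dep_desc)) desc_to_id with
    | some id => some id
    | none =>
      (desc_to_id.foldl (pvOvStep (PySem.Set.ofList (PySem.Str.split₀ (PySem.Str.strip (PySem.Str.lower dep_desc))))) (none, 0)).1

-- ===== PORT B =====
-- single pass: state = (exact, partial, best_match, best_overlap)
def pvAltStep (dql : String) (dw : PySem.Set String)
    (st : Option String × Option String × Option String × Int) (p : String × String) :
    Option String × Option String × Option String × Int :=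
  let dl := PySem.Str.lower p.1
  let exact := if st.1.isNone ∧ PySem.Str.strip dl = dql then some p.2 else st.1
  let part := if st.2.1.isNone ∧ (PySem.Str.isIn dql dl || PySem.Str.isIn dl dql) then some p.2 else st.2.1
  let overlap := PySem.Set.len (PySem.Set.inter dw (PySem.Set.ofList (PySem.Str.split₀ dl)))
  if st.2.2.2 < overlap ∧ 2 ≤ overlap then (exact, part, some p.2, overlap)
  else (exact, part, st.2.2.1, st.2.2.2)

def find_dependency_by_description_py_alt (dep_desc : String) (desc_to_id : List (String × String)) : Option String :=
  match desc_to_id.foldl (pvAltStep (PySem.Str.strip (PySem.Str.lower dep_desc)) (PySem.Set.ofList (PySem.Str.split₀ (PySem.Str.strip (PySem.Str.lower dep_desc))))) (none, none, none, 0) with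
  | (some id, _, _, _) => some id
  | (none, some id, _, _) => some id
  | (none, none, best, _) => best

-- ===== PRECONDITION & SPEC =====
def Spec_find_dependency_by_description_py (dep_desc : String) (desc_to_id : List (String × String)) (out : Option String) : Prop := out = find_dependency_by_description_py_alt dep_desc desc_to_id
instance (dep_desc : String) (desc_to_id : List (String × String)) (out : Option String) : Decidable (Spec_find_dependency_by_description_py dep_desc desc_to_id out) := by unfold Spec_find_dependency_by_description_py; infer_instance

-- ===== CLAIM (what is proved, stated in full; the proofs are below) =====
def Claim_equal_find_dependency_by_description_py : Prop := ∀ (dep_desc : String) (desc_to_id : List (String × String)), Dom_find_dependency_by_description_py dep_desc desc_to_id → Spec_find_dependency_by_description_py dep_desc desc_to_id (find_dependency_by_description_py dep_desc desc_to_id)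

-- ===== LEMMAS AND PROOFS =====

-- The single-pass fold computes, componentwise, A's three loops.
theorem pvScan_eq (dql : String) (dw : PySem.Set String) :
    ∀ (l : List (String × String)) (e p b : Option String) (n : Int),
    l.foldl (pvAltStep dql dw) (e, p, b, n) =
      ((match e with | some x => some x | none => pvFindExact dql l),
       (match p with | some x => some x | none => pvFindPartial dql l),
       l.foldl (pvOvStep dw) (b, n)) := by
  intro l
  induction l with
  | nil =>
      intro e p b n
      cases e <;> cases p <;> simp [pvFindExact, pvFindPartial]
  | cons hd tl ih =>
      intro e p b n
      obtain ⟨desc, node_id⟩ := hd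
      simp only [List.foldl_cons]
      rw [show pvAltStep dql dw (e, p, b, n) (desc, node_id) =
            ((if e.isNone ∧ PySem.Str.strip (PySem.Str.lower desc) = dql then some node_id else e),
             (if p.isNone ∧ (PySem.Str.isIn dql (PySem.Str.lower desc) || PySem.Str.isIn (PySem.Str.lower desc) dql) then some node_id else p),
             pvOvStep dw (b, n) (desc, node_id)) from by
        simp only [pvAltStep, pvOvStep]; split <;> rfl]
      rw [ih]
      cases e <;> cases p <;>
        simp only [Option.isNone_none, Option.isNone_some, true_and,
          pvFindExact, pvFindPartial] <;>
        split_ifs <;> simp_all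

-- ===== VERDICT (by name: the statement is the Claim_ definition above) =====
theorem find_dependency_by_description_py_spec : Claim_equal_find_dependency_by_description_py := by
  intro dep_desc desc_to_id _
  unfold Spec_find_dependency_by_description_py
  unfold find_dependency_by_description_py find_dependency_by_description_py_alt
  rw [pvScan_eq]
  cases pvFindExact (PySem.Str.strip (PySem.Str.lower dep_desc)) desc_to_id <;>
    cases pvFindPartial (PySem.Str.strip (PySem.Str.lower dep_desc)) desc_to_id <;> rfl
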